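-- pv_equiv track=rewrite | github.com/esraasarmad/search-engine | search-engine-main/app.py | summarize_result
-- ===== SOURCE A (Python) =====
-- def summarize_result(content, query):
--     content_lower = content.lower()
--
--     # تصنيف نوع المحتوى
--     if "interview with" in content_lower or "conversation with" in content_lower:
--         kind = "Author Interview"
--     elif "book review" in content_lower or "our review" in content_lower or "reviewed by" in content_lower:
--         kind = "Book Review"
--     elif "top books" in content_lower or "best books" in content_lower or "reading list" in content_lower:
--         kind = "Book List"
--     elif "analysis" in content_lower or "literary analysis" in content_lower:
--         kind = "Literary Analysis"
--     elif "excerpt from" in content_lower or "chapter one" in content_lower: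
--         kind = "Book Excerpt"
--     else:
--         kind = "General Book Content"
--
--     # تحديد الجنس الأدبي (genre)
--     genre_keywords = [
--         "fantasy", "thriller", "romance", "science fiction", "sci-fi", "non-fiction",
--         "biography", "memoir", "horror", "mystery", "historical fiction", "young adult",
--         "poetry", "drama", "classics", "philosophy"
--     ]
--     genres_found = [genre.title() for genre in genre_keywords if genre in content_lower]
--     genres_str = ", ".join(genres_found) if genres_found else "Unspecified"
--
--     # لا يوجد "Live" هنا، نستبدله بحالة نشر حديث
--     is_recent = "Recent" if "2024" in content_lower or "2025" in content_lower else "Archived"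
--
--     return kind, genres_str, is_recent
-- ===== SOURCE B (Python) =====
-- KIND_RULES = [
--     ("Author Interview", ("interview with", "conversation with")),
--     ("Book Review", ("book review", "our review", "reviewed by")),
--     ("Book List", ("top books", "best books", "reading list")),
--     ("Literary Analysis", ("analysis", "literary analysis")),
--     ("Book Excerpt", ("excerpt from", "chapter one")),
-- ]
--
-- GENRE_KEYWORDS = (
--     "fantasy", "thriller", "romance", "science fiction", "sci-fi", "non-fiction",
--     "biography", "memoir", "horror", "mystery", "historical fiction", "young adult",
--     "poetry", "drama", "classics", "philosophy",
-- )
--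
-- _ALL_KEYWORDS = tuple(kw for _, kws in KIND_RULES for kw in kws) + GENRE_KEYWORDS + ("2024", "2025")
--
--
-- def summarize_result(content, query):
--     cl = content.lower()
--     # Single left-to-right scan of the text: at each position collect every
--     # keyword that starts there; all three outputs are derived from that set.
--     found = set()
--     for i in range(len(cl)):
--         for kw in _ALL_KEYWORDS:
--             if cl.startswith(kw, i):
--                 found.add(kw)
--     kind = next((label for label, kws in KIND_RULES if not found.isdisjoint(kws)),
--                 "General Book Content")
--     genres = [kw.title() for kw in GENRE_KEYWORDS if kw in found]
--     genres_str = ", ".join(genres) if genres else "Unspecified"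
--     is_recent = "Recent" if not found.isdisjoint(("2024", "2025")) else "Archived"
--     return kind, genres_str, is_recent
-- ===== Notes on version B (the rewrite author's own statement) =====
-- stated objective: alternative
-- what changed: Instead of A's ~23 independent substring searches ('kw in content_lower'), B makes one left-to-right scan of the text, collecting at each position every keyword that starts there into a found-set, and then derives kind (first rule whose keyword set intersects found), genres and recency purely from that set.
import Mathlib
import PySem

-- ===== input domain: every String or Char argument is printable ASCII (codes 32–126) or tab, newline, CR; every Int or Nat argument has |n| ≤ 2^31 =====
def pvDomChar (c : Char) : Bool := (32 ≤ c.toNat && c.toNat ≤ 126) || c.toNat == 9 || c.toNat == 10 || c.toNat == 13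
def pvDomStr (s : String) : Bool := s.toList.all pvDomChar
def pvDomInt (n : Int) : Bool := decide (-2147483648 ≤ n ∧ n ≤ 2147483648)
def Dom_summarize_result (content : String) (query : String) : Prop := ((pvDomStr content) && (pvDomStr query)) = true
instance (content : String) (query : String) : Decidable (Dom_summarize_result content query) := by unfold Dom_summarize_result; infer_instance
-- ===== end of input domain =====

-- B replaces A's ~23 independent substring searches by ONE left-to-right scan of the text that
-- collects, at each position, every keyword starting there into a set; kind/genres/recency are
-- then read off that set (alternative algorithm; same results).

-- ===== PORT A =====
-- str.title(), hand-ported (PySem has no title); exact on the ASCII literals it is applied to here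
def pyTitleChars : Bool → List Char → List Char
  | _, [] => []
  | prev, c :: rest =>
    if PySem.Chars.isalpha c then
      (if prev then PySem.Chars.lowerChar c else PySem.Chars.upperChar c) :: pyTitleChars true rest
    else c :: pyTitleChars false rest

def pyTitle (s : String) : String := String.ofList (pyTitleChars false s.toList)

def pvGenreKeywords : List String :=
  ["fantasy", "thriller", "romance", "science fiction", "sci-fi", "non-fiction",
   "biography", "memoir", "horror", "mystery", "historical fiction", "young adult",
   "poetry", "drama", "classics", "philosophy"]

def summarize_result (content : String) (query : String) : String × String × String :=
  let cl := PySem.Str.lower content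
  let kind :=
    if PySem.Str.isIn "interview with" cl || PySem.Str.isIn "conversation with" cl then "Author Interview"
    else if PySem.Str.isIn "book review" cl || PySem.Str.isIn "our review" cl || PySem.Str.isIn "reviewed by" cl then "Book Review"
    else if PySem.Str.isIn "top books" cl || PySem.Str.isIn "best books" cl || PySem.Str.isIn "reading list" cl then "Book List"
    else if PySem.Str.isIn "analysis" cl || PySem.Str.isIn "literary analysis" cl then "Literary Analysis"
    else if PySem.Str.isIn "excerpt from" cl || PySem.Str.isIn "chapter one" cl then "Book Excerpt"
    else "General Book Content"
  let genresFound := (pvGenreKeywords.filter (fun g => PySem.Str.isIn g cl)).map pyTitle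
  let genresStr := if genresFound.isEmpty then "Unspecified" else PySem.Str.join ", " genresFound
  let isRecent := if PySem.Str.isIn "2024" cl || PySem.Str.isIn "2025" cl then "Recent" else "Archived"
  (kind, genresStr, isRecent)

-- ===== PORT B =====
def pvKindRules : List (String × List String) :=
  [("Author Interview", ["interview with", "conversation with"]),
   ("Book Review", ["book review", "our review", "reviewed by"]),
   ("Book List", ["top books", "best books", "reading list"]),
   ("Literary Analysis", ["analysis", "literary analysis"]),
   ("Book Excerpt", ["excerpt from", "chapter one"])]

-- _ALL_KEYWORDS = tuple(kw for _, kws in KIND_RULES for kw in kws) + GENRE_KEYWORDS + ("2024","2025")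
def pvAllKeywords : List String :=
  pvKindRules.flatMap Prod.snd ++ pvGenreKeywords ++ ["2024", "2025"]

-- the double loop 'for i in range(len(cl)): for kw in _ALL_KEYWORDS: if cl.startswith(kw, i): found.add(kw)';
-- cl.startswith(kw, i) with 0 ≤ i is exactly 'kw is a prefix of cl[i:]'
def pvScan (cl : List Char) : PySem.Set String :=
  (PySem.List.pyRange 0 cl.length 1).foldl
    (fun found i =>
      pvAllKeywords.foldl
        (fun f kw => if PySem.Chars.startswith (cl.drop i.toNat) kw.toList then PySem.Set.add f kw else f)
        found)
    PySem.Set.empty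

-- next((label for label, kws in KIND_RULES if not found.isdisjoint(kws)), "General Book Content")
def pvFirstKind (found : PySem.Set String) : List (String × List String) → String
  | [] => "General Book Content"
  | (lbl, kws) :: rest =>
    if !(PySem.Set.isdisjoint found kws) then lbl else pvFirstKind found rest

def summarize_result_alt (content : String) (query : String) : String × String × String :=
  let cl := PySem.Chars.lower content.toList
  let found := pvScan cl
  let kind := pvFirstKind found pvKindRules
  let genres := (pvGenreKeywords.filter (fun kw => PySem.Set.contains found kw)).map pyTitle
  let genresStr := if genres.isEmpty then "Unspecified" else PySem.Str.join ", " genres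
  let isRecent := if !(PySem.Set.isdisjoint found ["2024", "2025"]) then "Recent" else "Archived"
  (kind, genresStr, isRecent)

-- ===== PRECONDITION & SPEC =====
def Spec_summarize_result (content : String) (query : String) (out : String × String × String) : Prop := out = summarize_result_alt content query
instance (content : String) (query : String) (out : String × String × String) : Decidable (Spec_summarize_result content query out) := by unfold Spec_summarize_result; infer_instance

-- ===== CLAIM (what is proved, stated in full; the proofs are below) =====
def Claim_equal_summarize_result : Prop := ∀ (content : String) (query : String), Dom_summarize_result content query → Spec_summarize_result content query (summarize_result content query)

-- ===== LEMMAS AND PROOFS =====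

-- membership in the inner keyword loop
theorem mem_foldl_addIf (p : String → Bool) (xs : List String) (s : PySem.Set String) (y : String) :
    y ∈ xs.foldl (fun f kw => if p kw then PySem.Set.add f kw else f) s ↔
      y ∈ s ∨ (y ∈ xs ∧ p y = true) := by
  induction xs generalizing s with
  | nil => simp
  | cons k ks ih =>
    simp only [List.foldl_cons, ih, List.mem_cons]
    by_cases hk : p k = true
    · simp [hk, PySem.Set.mem_add]
      constructor
      · rintro (⟨h | rfl⟩ | h)
        · exact Or.inl h
        · exact Or.inr ⟨Or.inl rfl, hk⟩
        · exact Or.inr ⟨Or.inr h.1, h.2⟩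
      · rintro (h | ⟨rfl | h, hp⟩)
        · exact Or.inl (Or.inl h)
        · exact Or.inl (Or.inr rfl)
        · exact Or.inr ⟨h, hp⟩
    · simp only [hk, Bool.false_eq_true, if_false]
      constructor
      · rintro (h | h)
        · exact Or.inl h
        · exact Or.inr ⟨Or.inr h.1, h.2⟩
      · rintro (h | ⟨rfl | h, hp⟩)
        · exact Or.inl h
        · exact (hk hp).elim
        · exact Or.inr ⟨h, hp⟩

-- membership in the whole scan, over an arbitrary list of positions
theorem mem_scan_aux (cl : List Char) (is : List Int) (s : PySem.Set String) (y : String) :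
    y ∈ is.foldl
        (fun found i =>
          pvAllKeywords.foldl
            (fun f kw => if PySem.Chars.startswith (cl.drop i.toNat) kw.toList then PySem.Set.add f kw else f)
            found)
        s ↔
      y ∈ s ∨ (y ∈ pvAllKeywords ∧ ∃ i ∈ is, PySem.Chars.startswith (cl.drop i.toNat) y.toList = true) := by
  induction is generalizing s with
  | nil => simp
  | cons i rest ih =>
    simp only [List.foldl_cons, ih, mem_foldl_addIf]
    constructor
    · rintro ((h | ⟨hm, hp⟩) | ⟨hm, j, hj, hp⟩)
      · exact Or.inl h
      · exact Or.inr ⟨hm, i, List.mem_cons_self .., hp⟩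
      · exact Or.inr ⟨hm, j, List.mem_cons_of_mem _ hj, hp⟩
    · rintro (h | ⟨hm, j, hj, hp⟩)
      · exact Or.inl (Or.inl h)
      · rcases List.mem_cons.mp hj with rfl | hj
        · exact Or.inl (Or.inr ⟨hm, hp⟩)
        · exact Or.inr ⟨hm, j, hj, hp⟩

-- what the scan finds is exactly the keywords occurring in the text
theorem mem_scan (cl : List Char) (kw : String) (hne : kw.toList ≠ []) :
    kw ∈ pvScan cl ↔ kw ∈ pvAllKeywords ∧ PySem.Chars.isIn kw.toList cl = true := by
  unfold pvScan
  rw [mem_scan_aux]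
  simp only [PySem.Set.empty, List.not_mem_nil, false_or]
  constructor
  · rintro ⟨hm, i, hi, hp⟩
    refine ⟨hm, ?_⟩
    rw [← PySem.Chars.exists_prefix_drop_iff_isIn]
    exact ⟨i.toNat, (PySem.Chars.startswith_iff _ _).mp hp⟩
  · rintro ⟨hm, hin⟩
    refine ⟨hm, ?_⟩
    obtain ⟨j, hj⟩ := (PySem.Chars.exists_prefix_drop_iff_isIn kw.toList cl).mpr hin
    have hlen : kw.toList.length ≤ (cl.drop j).length := hj.length_le
    have hkw : kw.toList.length ≠ 0 := by
      simpa using hne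
    rw [List.length_drop] at hlen
    have hjlt : j < cl.length := by omega
    refine ⟨(j : Int), ?_, ?_⟩
    · rw [PySem.List.mem_pyRange_one]
      constructor
      · exact_mod_cast Nat.zero_le j
      · exact_mod_cast hjlt
    · rw [Int.toNat_natCast]
      exact (PySem.Chars.startswith_iff _ _).mpr hj

theorem contains_scan (cl : List Char) (kw : String) (hm : kw ∈ pvAllKeywords) (hne : kw.toList ≠ []) :
    PySem.Set.contains (pvScan cl) kw = PySem.Chars.isIn kw.toList cl := by
  by_cases h : PySem.Chars.isIn kw.toList cl = true
  · rw [h]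
    exact (PySem.Set.contains_iff _ _).mpr ((mem_scan cl kw hne).mpr ⟨hm, h⟩)
  · rw [Bool.not_eq_true] at h
    rw [h, ← Bool.not_eq_true]
    intro hc
    have := (mem_scan cl kw hne).mp ((PySem.Set.contains_iff _ _).mp hc)
    rw [this.2] at h
    exact Bool.noConfusion h

-- 'not found.isdisjoint(kws)' is 'some keyword of kws occurs in the text'
theorem bnot_isdisjoint_scan (cl : List Char) (t : List String)
    (h : ∀ kw ∈ t, kw ∈ pvAllKeywords ∧ kw.toList ≠ []) :
    (!(PySem.Set.isdisjoint (pvScan cl) t)) = t.any (fun kw => PySem.Chars.isIn kw.toList cl) := by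
  rw [Bool.eq_iff_iff]
  simp only [Bool.not_eq_true', List.any_eq_true]
  constructor
  · intro hd
    have : ¬ (∀ x ∈ pvScan cl, x ∉ t) := fun hall => by
      rw [(PySem.Set.isdisjoint_iff _ _).mpr hall] at hd
      exact Bool.noConfusion hd.symm
    push Not at this
    obtain ⟨x, hx, hxt⟩ := this
    refine ⟨x, hxt, ?_⟩
    exact ((mem_scan cl x (h x hxt).2).mp hx).2
  · rintro ⟨x, hxt, hin⟩
    rw [← Bool.not_eq_true]
    intro hd
    exact (PySem.Set.isdisjoint_iff _ _).mp hd x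
      ((mem_scan cl x (h x hxt).2).mpr ⟨(h x hxt).1, hin⟩) hxt

theorem genre_keywords_ok : ∀ kw ∈ pvGenreKeywords, kw ∈ pvAllKeywords ∧ kw.toList ≠ [] := by decide

theorem kind_keywords_ok : ∀ r ∈ pvKindRules, ∀ kw ∈ r.2, kw ∈ pvAllKeywords ∧ kw.toList ≠ [] := by decide

theorem year_keywords_ok : ∀ kw ∈ (["2024", "2025"] : List String), kw ∈ pvAllKeywords ∧ kw.toList ≠ [] := by decide

-- ===== VERDICT (by name: the statement is the Claim_ definition above) =====
theorem summarize_result_spec : Claim_equal_summarize_result := by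
  intro content query _
  unfold Spec_summarize_result summarize_result summarize_result_alt
  have hkind : ∀ r ∈ pvKindRules,
      (!(PySem.Set.isdisjoint (pvScan (PySem.Chars.lower content.toList)) r.2))
        = r.2.any (fun kw => PySem.Chars.isIn kw.toList (PySem.Chars.lower content.toList)) :=
    fun r hr => bnot_isdisjoint_scan _ _ (kind_keywords_ok r hr)
  have hgen : pvGenreKeywords.filter (fun kw => PySem.Set.contains (pvScan (PySem.Chars.lower content.toList)) kw)
      = pvGenreKeywords.filter (fun kw => PySem.Chars.isIn kw.toList (PySem.Chars.lower content.toList)) := by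
    apply List.filter_congr
    intro kw hkw
    exact contains_scan _ kw (genre_keywords_ok kw hkw).1 (genre_keywords_ok kw hkw).2
  simp only [pvFirstKind, pvKindRules, hgen,
    hkind _ (by decide : (("Author Interview", ["interview with", "conversation with"]) : String × List String) ∈ pvKindRules),
    hkind _ (by decide : (("Book Review", ["book review", "our review", "reviewed by"]) : String × List String) ∈ pvKindRules),
    hkind _ (by decide : (("Book List", ["top books", "best books", "reading list"]) : String × List String) ∈ pvKindRules),
    hkind _ (by decide : (("Literary Analysis", ["analysis", "literary analysis"]) : String × List String) ∈ pvKindRules),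
    hkind _ (by decide : (("Book Excerpt", ["excerpt from", "chapter one"]) : String × List String) ∈ pvKindRules),
    bnot_isdisjoint_scan _ _ year_keywords_ok,
    List.any_cons, List.any_nil, Bool.or_false, Bool.or_assoc, PySem.Str.isIn_eq, PySem.Str.toList_lower]
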